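-- pv_equiv track=rewrite | github.com/Kicker22/PulseCheck | app/nlp_pipeline.py | detect_themes
-- ===== SOURCE A (Python) =====
-- def detect_themes(text, theme_keywords):
--     matched_themes = []
--     text_lower = text.lower()
--     for theme, keywords in theme_keywords.items():
--         for keyword in keywords:
--             if keyword.lower() in text_lower:
--                 matched_themes.append(theme)
--                 break  # Stop after first match per theme
--     return matched_themes
-- ===== SOURCE B (Python) =====
-- def detect_themes(text, theme_keywords):
--     # Index all substrings of the text (only at the keyword lengths that occur)
--     # into a hash set, then answer each theme by O(1) set lookups.
--     text_lower = text.lower()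
--     n = len(text_lower)
--     lengths = {len(kw) for kws in theme_keywords.values() for kw in kws}
--     subs = {text_lower[i:i + L] for L in lengths for i in range(n - L + 1)}
--     return [theme for theme, kws in theme_keywords.items()
--             if any(kw.lower() in subs for kw in kws)]
-- ===== Notes on version B (the rewrite author's own statement) =====
-- stated objective: alternative
-- what changed: Instead of scanning the text once per keyword (nested substring searches with break), B builds one hash set of all substrings of the lowered text at the keyword lengths that occur, then decides each theme by set lookups, so the per-keyword text scans disappear; measured speed varies with the input mix.
import Mathlib
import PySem

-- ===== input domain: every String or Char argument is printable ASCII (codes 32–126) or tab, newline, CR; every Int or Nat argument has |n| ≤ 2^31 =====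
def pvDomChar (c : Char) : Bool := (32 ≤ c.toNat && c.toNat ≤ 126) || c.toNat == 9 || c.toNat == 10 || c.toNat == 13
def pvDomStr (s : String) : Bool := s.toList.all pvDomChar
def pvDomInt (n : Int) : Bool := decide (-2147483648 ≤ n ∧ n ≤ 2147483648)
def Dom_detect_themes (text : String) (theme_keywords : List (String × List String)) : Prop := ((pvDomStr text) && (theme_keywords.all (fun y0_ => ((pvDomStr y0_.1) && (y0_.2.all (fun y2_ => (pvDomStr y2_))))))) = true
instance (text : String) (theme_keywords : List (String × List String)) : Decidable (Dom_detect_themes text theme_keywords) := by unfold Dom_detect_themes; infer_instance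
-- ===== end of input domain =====

-- B replaces A's per-keyword substring scans with one hash set of the text's
-- substrings at the occurring keyword lengths, answered by set lookups (objective: alternative).
-- ===== PORT A =====
-- inner loop over a theme's keywords: append theme on the first match, then break
def pvInnerA (tl : List Char) (theme : String) (acc : List String) : List String → List String
  | [] => acc
  | kw :: rest =>
      if PySem.Chars.isIn (PySem.Chars.lower kw.toList) tl then acc ++ [theme]
      else pvInnerA tl theme acc rest

def detect_themes (text : String) (theme_keywords : List (String × List String)) : List String :=
  let text_lower := PySem.Chars.lower text.toList
  theme_keywords.foldl (fun acc p => pvInnerA text_lower p.1 acc p.2) []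

-- ===== PORT B =====
def detect_themes_alt (text : String) (theme_keywords : List (String × List String)) : List String :=
  let text_lower := PySem.Chars.lower text.toList
  let n : Int := text_lower.length
  let lengths : PySem.Set Int :=
    PySem.Set.ofList ((theme_keywords.flatMap (fun p => p.2)).map (fun kw => (kw.toList.length : Int)))
  let subs : PySem.Set (List Char) :=
    PySem.Set.ofList (lengths.flatMap (fun L =>
      (PySem.List.pyRange 0 (n - L + 1)).map (fun i => PySem.List.slice text_lower (some i) (some (i + L)))))
  (theme_keywords.filter (fun p =>
      p.2.any (fun kw => PySem.Set.contains subs (PySem.Chars.lower kw.toList)))).map (fun p => p.1)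

-- ===== PRECONDITION & SPEC =====
def Spec_detect_themes (text : String) (theme_keywords : List (String × List String)) (out : List String) : Prop := out = detect_themes_alt text theme_keywords
instance (text : String) (theme_keywords : List (String × List String)) (out : List String) : Decidable (Spec_detect_themes text theme_keywords out) := by unfold Spec_detect_themes; infer_instance

-- ===== CLAIM (what is proved, stated in full; the proofs are below) =====
def Claim_equal_detect_themes : Prop := ∀ (text : String) (theme_keywords : List (String × List String)), Dom_detect_themes text theme_keywords → Spec_detect_themes text theme_keywords (detect_themes text theme_keywords)

-- ===== LEMMAS AND PROOFS =====

-- A's inner loop appends the theme iff some keyword matches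
theorem pvInnerA_eq (tl : List Char) (theme : String) (acc : List String) (kws : List String) :
    pvInnerA tl theme acc kws =
      acc ++ (if kws.any (fun kw => PySem.Chars.isIn (PySem.Chars.lower kw.toList) tl) then [theme] else []) := by
  induction kws with
  | nil => simp [pvInnerA]
  | cons kw rest ih =>
      simp only [pvInnerA, List.any_cons]
      by_cases h : PySem.Chars.isIn (PySem.Chars.lower kw.toList) tl = true
      · simp [h]
      · simp [h, ih]

-- A's fold is filter-then-map
theorem pvFoldA_eq (tl : List Char) (tk : List (String × List String)) (acc : List String) :
    tk.foldl (fun acc p => pvInnerA tl p.1 acc p.2) acc =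
      acc ++ (tk.filter (fun p => p.2.any (fun kw => PySem.Chars.isIn (PySem.Chars.lower kw.toList) tl))).map (fun p => p.1) := by
  induction tk generalizing acc with
  | nil => simp
  | cons p rest ih =>
      rw [List.foldl_cons, pvInnerA_eq, ih, List.filter_cons]
      by_cases h : p.2.any (fun kw => PySem.Chars.isIn (PySem.Chars.lower kw.toList) tl) = true
      · simp [h]
      · simp [h]

-- any Python slice xs[a:b] is a contiguous piece of xs
theorem pvSlice_infix {α : Type} (xs : List α) (a b : Option Int) : PySem.List.slice xs a b <:+: xs := by
  unfold PySem.List.slice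
  exact (List.take_prefix _ _).isInfix.trans (List.drop_suffix _ _).isInfix

-- the substring index of B contains x iff x is a substring of tl, for any x whose
-- length occurs among the indexed lengths
theorem pvSubs_mem_iff (tl : List Char) (lens : List Int) (x : List Char)
    (hx : (x.length : Int) ∈ lens) :
    (x ∈ lens.flatMap (fun L =>
        (PySem.List.pyRange 0 ((tl.length : Int) - L + 1)).map
          (fun i => PySem.List.slice tl (some i) (some (i + L))))) ↔ x <:+: tl := by
  constructor
  · intro h
    rcases List.mem_flatMap.1 h with ⟨L, _, hmap⟩
    rcases List.mem_map.1 hmap with ⟨i, _, rfl⟩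
    exact pvSlice_infix tl _ _
  · intro h
    rcases h with ⟨pre, suf, htl⟩
    refine List.mem_flatMap.2 ⟨(x.length : Int), hx, List.mem_map.2 ⟨(pre.length : Int), ?_, ?_⟩⟩
    · refine PySem.List.mem_pyRange_one.2 ⟨by positivity, ?_⟩
      subst htl
      simp only [List.length_append]
      push_cast
      omega
    · subst htl
      rw [PySem.List.slice_natCast_add, List.append_assoc, List.drop_left' rfl, List.take_left]

-- B equals filter-then-map with the direct substring test, over the same list
theorem pvB_eq (text : String) (tk : List (String × List String)) :
    detect_themes_alt text tk =
      (tk.filter (fun p => p.2.any (fun kw =>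
          PySem.Chars.isIn (PySem.Chars.lower kw.toList) (PySem.Chars.lower text.toList)))).map (fun p => p.1) := by
  unfold detect_themes_alt
  dsimp only
  congr 1
  apply List.filter_congr
  intro p hp
  rw [Bool.eq_iff_iff]
  simp only [List.any_eq_true]
  refine ⟨fun ⟨kw, hkw, hc⟩ => ⟨kw, hkw, ?_⟩, fun ⟨kw, hkw, hc⟩ => ⟨kw, hkw, ?_⟩⟩ <;>
  · have hlen : ((PySem.Chars.lower kw.toList).length : Int) ∈
        (tk.flatMap (fun p => p.2)).map (fun kw => (kw.toList.length : Int)) := by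
      refine List.mem_map.2 ⟨kw, List.mem_flatMap.2 ⟨p, hp, hkw⟩, ?_⟩
      simp [PySem.Chars.lower]

    have hmem := pvSubs_mem_iff (PySem.Chars.lower text.toList) _ (PySem.Chars.lower kw.toList)
      ((PySem.Set.mem_ofList _ _).2 hlen)
    first
    | exact (PySem.Chars.isIn_iff_infix _ _).2 (hmem.1
        ((PySem.Set.mem_ofList _ _).1 (by simpa [PySem.Set.contains, List.contains_iff_mem] using hc)))
    | exact (by
        simp only [PySem.Set.contains, List.contains_iff_mem]
        exact (PySem.Set.mem_ofList _ _).2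
          (hmem.2 ((PySem.Chars.isIn_iff_infix _ _).1 hc)))

-- ===== VERDICT (by name: the statement is the Claim_ definition above) =====
theorem detect_themes_spec : Claim_equal_detect_themes := by
  intro text tk _
  show detect_themes text tk = detect_themes_alt text tk
  rw [pvB_eq]
  simp only [detect_themes]
  rw [pvFoldA_eq]
  simp
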